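-- pv_equiv track=rewrite | github.com/weebyesyes/Primes-paper-repo | enumerate_words.py | orbit_representatives
-- ===== SOURCE A (Python) =====
-- def rot(word, k):
--     p = len(word)
--     return ''.join(word[(i-k)%p] for i in range(p))
--
-- def refl(word, k):
--     p = len(word)
--     return ''.join(word[(k - i) % p] for i in range(p))
--
-- def dihedral_orbit(word):
--     p = len(word)
--     seen = set()
--     for k in range(p):
--         seen.add(rot(word, k))
--         seen.add(refl(word, k))
--     return seen
--
-- def orbit_representatives(words):
--     remaining = set(words)
--     orbits, reps = [], []
--     while remaining:
--         w = min(remaining)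
--         orb = dihedral_orbit(w)
--         orbits.append(orb)
--         reps.append(w)
--         remaining -= orb
--     return orbits, reps
-- ===== SOURCE B (Python) =====
-- def rot(word, k):
--     p = len(word)
--     return ''.join(word[(i-k)%p] for i in range(p))
--
-- def refl(word, k):
--     p = len(word)
--     return ''.join(word[(k - i) % p] for i in range(p))
--
-- def dihedral_orbit(word):
--     p = len(word)
--     seen = set()
--     for k in range(p):
--         seen.add(rot(word, k))
--         seen.add(refl(word, k))
--     return seen
--
-- def orbit_representatives(words):
--     # canonical-form bucketing: key each word by min(dihedral_orbit(word));
--     # over the sorted distinct words the first word of each key is the class minimum.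
--     buckets = {}
--     for w in sorted(set(words)):
--         c = min(dihedral_orbit(w))
--         if c not in buckets:
--             buckets[c] = w
--     reps = list(buckets.values())
--     orbits = [dihedral_orbit(r) for r in reps]
--     return orbits, reps
-- ===== Notes on version B (the rewrite author's own statement) =====
-- stated objective: faster
-- what changed: Replaces A's repeated min-extraction with whole-orbit set subtraction from a shrinking set (an O(n) scan per orbit) by canonical-form bucketing: each distinct word, taken in sorted order, is keyed by min(dihedral_orbit(word)) in a dict, the dict's values are the reps, and the orbits are rebuilt from the reps in a second pass.
-- outside the precondition, e.g. on orbit_representatives(['']): A does not finish within the time limit, B raises ValueError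
import Mathlib
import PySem

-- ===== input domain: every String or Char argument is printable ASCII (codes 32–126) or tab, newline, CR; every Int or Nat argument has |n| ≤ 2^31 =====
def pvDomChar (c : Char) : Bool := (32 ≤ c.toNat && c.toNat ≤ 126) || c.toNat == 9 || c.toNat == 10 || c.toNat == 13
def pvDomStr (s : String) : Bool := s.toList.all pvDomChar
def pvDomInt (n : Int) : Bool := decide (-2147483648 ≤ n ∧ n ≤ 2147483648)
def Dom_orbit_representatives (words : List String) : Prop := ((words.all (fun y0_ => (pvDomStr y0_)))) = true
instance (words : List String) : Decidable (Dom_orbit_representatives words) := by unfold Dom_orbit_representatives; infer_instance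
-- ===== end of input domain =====

-- B replaces A's repeated min-extraction with whole-orbit subtraction from a shrinking set
-- by canonical-form bucketing: each distinct word (in sorted order) is keyed by
-- min(dihedral_orbit(word)) in a dict, the dict values are the reps and the orbits are
-- rebuilt from the reps (objective: faster; a timing run measured B faster).

-- ===== PORT A =====
-- module-level helpers rot / refl / dihedral_orbit, shared by both ports as in the Python module.
-- ''.join over the generated characters is String.ofList of the mapped list (exact: each item is one char);
-- pyGetD is exact here: the index (i-k) % p resp. (k-i) % p is always in range when 0 ≤ i < p.
def pvRot (word : String) (k : Int) : String :=
  String.ofList ((PySem.List.pyRange 0 (word.toList.length : Int)).map fun i =>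
    PySem.List.pyGetD word.toList (PySem.Int.mod (i - k) (word.toList.length : Int)) ' ')

def pvRefl (word : String) (k : Int) : String :=
  String.ofList ((PySem.List.pyRange 0 (word.toList.length : Int)).map fun i =>
    PySem.List.pyGetD word.toList (PySem.Int.mod (k - i) (word.toList.length : Int)) ' ')

def pvDihedralOrbit (word : String) : PySem.Set String :=
  (PySem.List.pyRange 0 (word.toList.length : Int)).foldl
    (fun seen k => (seen.add (pvRot word k)).add (pvRefl word k)) PySem.Set.empty

-- A's while-loop; fuel = |remaining| suffices (each pass removes min; Python loops forever
-- only when '' is in the set, which Pre_ excludes — there the fuel guard stops instead).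
def pvLoopA : Nat → PySem.Set String → List (List String) → List String → List (List String) × List String
  | 0, _, orbits, reps => (orbits, reps)
  | fuel+1, remaining, orbits, reps =>
    match PySem.List.min? remaining (fun x => x) with
    | none => (orbits, reps)          -- remaining is empty: while-loop exits
    | some w =>
      let orb := pvDihedralOrbit w
      pvLoopA fuel (PySem.Set.diff remaining orb) (orbits ++ [orb]) (reps ++ [w])

def orbit_representatives (words : List String) : List (List String) × List String :=
  let remaining := PySem.Set.ofList words
  pvLoopA remaining.length remaining [] []

-- ===== PORT B =====
-- one bucket-dict step: c = min(dihedral_orbit(w)); if c not in buckets: buckets[c] = w.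
-- Python's min() raises on an empty set (only for w = '', excluded by Pre_): the none branch
-- only makes the step total.
def pvBucketStep (d : PySem.Dict String String) (w : String) : PySem.Dict String String :=
  match PySem.List.min? (pvDihedralOrbit w) (fun x => x) with
  | none => d
  | some c => if d.contains c then d else d.insert c w

def orbit_representatives_alt (words : List String) : List (List String) × List String :=
  let buckets := (PySem.List.sorted (PySem.Set.ofList words) (fun x => x)).foldl pvBucketStep PySem.Dict.empty
  let reps := buckets.values
  (reps.map pvDihedralOrbit, reps)

-- ===== PRECONDITION & SPEC =====
-- Pre_ excludes lists containing the empty string: there dihedral_orbit('') is empty, nothing is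
-- ever removed from 'remaining', and A loops forever (returns nothing); B raises ValueError (min of an empty set).
def Pre_orbit_representatives (words : List String) : Prop := "" ∉ words
instance (words : List String) : Decidable (Pre_orbit_representatives words) := by unfold Pre_orbit_representatives; infer_instance
def pvWitness_orbit_representatives : List String := ["ab", "ba", "c"]

def Spec_orbit_representatives (words : List String) (out : List (List String) × List String) : Prop := out = orbit_representatives_alt words
instance (words : List String) (out : List (List String) × List String) : Decidable (Spec_orbit_representatives words out) := by unfold Spec_orbit_representatives; infer_instance

-- ===== CLAIM (what is proved, stated in full; the proofs are below) =====
def Claim_equal_orbit_representatives : Prop := ∀ (words : List String), Dom_orbit_representatives words → Pre_orbit_representatives words → Spec_orbit_representatives words (orbit_representatives words)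

-- ===== LEMMAS AND PROOFS =====

-- proof-only helpers: the canonical form of a word, the scan intermediate form of A's loop,
-- and the list of representatives kept while scanning the sorted distinct words.
def pvCanon (w : String) : Option String := PySem.List.min? (pvDihedralOrbit w) (fun x => x)

def pvScan : List String → PySem.Set String → List (List String) → List String → List (List String) × List String
  | [], _, orbits, reps => (orbits, reps)
  | w :: t, seen, orbits, reps =>
    if List.contains seen w then pvScan t seen orbits reps
    else
      let orb := pvDihedralOrbit w
      pvScan t (PySem.Set.union seen orb) (orbits ++ [orb]) (reps ++ [w])

def pvKept : List String → List String → List String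
  | [], _ => []
  | w :: t, ks =>
    match pvCanon w with
    | none => pvKept t ks
    | some c => if c ∈ ks then pvKept t ks else w :: pvKept t (c :: ks)

lemma pvKept_cons_some (w : String) (t ks : List String) {c : String} (hc : pvCanon w = some c) :
    pvKept (w :: t) ks = if c ∈ ks then pvKept t ks else w :: pvKept t (c :: ks) := by
  rw [pvKept, hc]

-- ---- basic string / index facts ----

lemma len_pos_of_ne (w : String) (hw : w ≠ "") : 0 < (w.toList.length : Int) := by
  have h : w.toList ≠ [] := fun h => hw (by
    have := congrArg String.ofList h; rwa [String.ofList_toList] at this)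
  cases h2 : w.toList with
  | nil => exact absurd h2 h
  | cons a l => exact_mod_cast Nat.succ_pos l.length

lemma emod_sub_left_emod (a b L : Int) : (a % L - b) % L = (a - b) % L :=
  Int.emod_sub_emod a L b

lemma sub_emod_right_emod (a b L : Int) : (a - b % L) % L = (a - b) % L := by
  conv_rhs => rw [Int.sub_emod]
  rw [Int.sub_emod a (b % L) L, Int.emod_emod_of_dvd b dvd_rfl]

lemma toList_pvRot (w : String) (k : Int) :
    (pvRot w k).toList = (PySem.List.pyRange 0 (w.toList.length : Int)).map
      (fun i => PySem.List.pyGetD w.toList (PySem.Int.mod (i - k) (w.toList.length : Int)) ' ') :=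
  String.toList_ofList

lemma toList_pvRefl (w : String) (k : Int) :
    (pvRefl w k).toList = (PySem.List.pyRange 0 (w.toList.length : Int)).map
      (fun i => PySem.List.pyGetD w.toList (PySem.Int.mod (k - i) (w.toList.length : Int)) ' ') :=
  String.toList_ofList

lemma length_pvRot (w : String) (k : Int) : (pvRot w k).toList.length = w.toList.length := by
  rw [toList_pvRot, List.length_map, PySem.List.length_pyRange_one]; omega

lemma length_pvRefl (w : String) (k : Int) : (pvRefl w k).toList.length = w.toList.length := by
  rw [toList_pvRefl, List.length_map, PySem.List.length_pyRange_one]; omega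

-- rot(w, 0) = w
lemma pvRot_zero (w : String) : pvRot w 0 = w := by
  unfold pvRot
  have h : ∀ i ∈ PySem.List.pyRange 0 (w.toList.length : Int),
      PySem.List.pyGetD w.toList (PySem.Int.mod (i - 0) (w.toList.length : Int)) ' '
        = PySem.List.pyGetD w.toList i ' ' := by
    intro i hi
    rw [PySem.List.mem_pyRange_one] at hi
    rw [sub_zero, PySem.Int.mod_eq_emod_of_pos (by omega), Int.emod_eq_of_lt hi.1 hi.2]
  rw [List.map_congr_left h, PySem.List.map_pyGetD_pyRange_zero', String.ofList_toList]

-- membership in the orbit set, as built by the fold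
lemma mem_foldl_add2 {f g : Int → String} :
    ∀ (ks : List Int) (s : PySem.Set String) (y : String),
      y ∈ ks.foldl (fun acc k => (acc.add (f k)).add (g k)) s ↔
        y ∈ s ∨ ∃ k ∈ ks, y = f k ∨ y = g k := by
  intro ks
  induction ks with
  | nil => intro s y; simp
  | cons k t ih =>
    intro s y
    simp only [List.foldl_cons, ih, PySem.Set.mem_add, List.mem_cons]
    constructor
    · rintro (((h | h) | h) | ⟨j, hj, h⟩)
      · exact Or.inl h
      · exact Or.inr ⟨k, Or.inl rfl, Or.inl h⟩
      · exact Or.inr ⟨k, Or.inl rfl, Or.inr h⟩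
      · exact Or.inr ⟨j, Or.inr hj, h⟩
    · rintro (h | ⟨j, (rfl | hj), h⟩)
      · exact Or.inl (Or.inl (Or.inl h))
      · rcases h with h | h
        · exact Or.inl (Or.inl (Or.inr h))
        · exact Or.inl (Or.inr h)
      · exact Or.inr ⟨j, hj, h⟩

lemma mem_orbit_iff (w x : String) :
    x ∈ pvDihedralOrbit w ↔
      ∃ k, k ∈ PySem.List.pyRange 0 (w.toList.length : Int) ∧ (x = pvRot w k ∨ x = pvRefl w k) := by
  unfold pvDihedralOrbit
  rw [mem_foldl_add2]
  simp [PySem.Set.empty]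

-- rot / refl depend on k only through k % p
lemma pvRot_congr_mod (w : String) {k k' : Int} (hp : 0 < (w.toList.length : Int))
    (h : k % (w.toList.length : Int) = k' % (w.toList.length : Int)) : pvRot w k = pvRot w k' := by
  unfold pvRot
  refine congrArg String.ofList (List.map_congr_left ?_)
  intro i _
  rw [PySem.Int.mod_eq_emod_of_pos hp, PySem.Int.mod_eq_emod_of_pos hp,
    ← sub_emod_right_emod i k, h, sub_emod_right_emod]

lemma pvRefl_congr_mod (w : String) {k k' : Int} (hp : 0 < (w.toList.length : Int))
    (h : k % (w.toList.length : Int) = k' % (w.toList.length : Int)) : pvRefl w k = pvRefl w k' := by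
  unfold pvRefl
  refine congrArg String.ofList (List.map_congr_left ?_)
  intro i _
  rw [PySem.Int.mod_eq_emod_of_pos hp, PySem.Int.mod_eq_emod_of_pos hp,
    ← emod_sub_left_emod k i, h, emod_sub_left_emod]

lemma rot_mem_orbit (w : String) (hp : 0 < (w.toList.length : Int)) (k : Int) :
    pvRot w k ∈ pvDihedralOrbit w := by
  refine (mem_orbit_iff w _).mpr ⟨k % (w.toList.length : Int), ?_, Or.inl ?_⟩
  · exact (PySem.List.mem_pyRange_one).mpr ⟨Int.emod_nonneg _ (by omega), Int.emod_lt_of_pos _ hp⟩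
  · exact pvRot_congr_mod w hp (by rw [Int.emod_emod_of_dvd _ dvd_rfl])

lemma refl_mem_orbit (w : String) (hp : 0 < (w.toList.length : Int)) (k : Int) :
    pvRefl w k ∈ pvDihedralOrbit w := by
  refine (mem_orbit_iff w _).mpr ⟨k % (w.toList.length : Int), ?_, Or.inr ?_⟩
  · exact (PySem.List.mem_pyRange_one).mpr ⟨Int.emod_nonneg _ (by omega), Int.emod_lt_of_pos _ hp⟩
  · exact pvRefl_congr_mod w hp (by rw [Int.emod_emod_of_dvd _ dvd_rfl])

-- a nonempty word lies in its own dihedral orbit (it is rot(w,0))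
lemma mem_orbit_self (w : String) (hw : w ≠ "") : w ∈ pvDihedralOrbit w := by
  have hp := len_pos_of_ne w hw
  have := rot_mem_orbit w hp 0
  rwa [pvRot_zero] at this

-- ---- composition laws of the dihedral transforms ----

lemma rot_rot (w : String) (hp : 0 < (w.toList.length : Int)) (k j : Int) :
    pvRot (pvRot w k) j = pvRot w (k + j) := by
  rw [show pvRot (pvRot w k) j = String.ofList
      ((PySem.List.pyRange 0 ((pvRot w k).toList.length : Int)).map fun i =>
        PySem.List.pyGetD (pvRot w k).toList
          (PySem.Int.mod (i - j) ((pvRot w k).toList.length : Int)) ' ') from rfl,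
    length_pvRot]
  unfold pvRot
  refine congrArg String.ofList (List.map_congr_left ?_)
  intro i hi
  rw [PySem.List.mem_pyRange_one] at hi
  rw [String.toList_ofList]
  simp only [PySem.Int.mod_eq_emod_of_pos hp]
  rw [PySem.List.pyGetD_map_pyRange_of_nonneg _ _ _ _ (Int.emod_nonneg _ (by omega))
    (Int.emod_lt_of_pos _ hp)]
  rw [emod_sub_left_emod]
  congr 2
  ring

lemma refl_rot (w : String) (hp : 0 < (w.toList.length : Int)) (k j : Int) :
    pvRefl (pvRot w k) j = pvRefl w (j - k) := by
  rw [show pvRefl (pvRot w k) j = String.ofList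
      ((PySem.List.pyRange 0 ((pvRot w k).toList.length : Int)).map fun i =>
        PySem.List.pyGetD (pvRot w k).toList
          (PySem.Int.mod (j - i) ((pvRot w k).toList.length : Int)) ' ') from rfl,
    length_pvRot]
  unfold pvRot pvRefl
  refine congrArg String.ofList (List.map_congr_left ?_)
  intro i hi
  rw [PySem.List.mem_pyRange_one] at hi
  rw [String.toList_ofList]
  simp only [PySem.Int.mod_eq_emod_of_pos hp]
  rw [PySem.List.pyGetD_map_pyRange_of_nonneg _ _ _ _ (Int.emod_nonneg _ (by omega))
    (Int.emod_lt_of_pos _ hp)]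
  rw [emod_sub_left_emod]
  congr 2
  ring

lemma rot_refl (w : String) (hp : 0 < (w.toList.length : Int)) (k j : Int) :
    pvRot (pvRefl w k) j = pvRefl w (k + j) := by
  rw [show pvRot (pvRefl w k) j = String.ofList
      ((PySem.List.pyRange 0 ((pvRefl w k).toList.length : Int)).map fun i =>
        PySem.List.pyGetD (pvRefl w k).toList
          (PySem.Int.mod (i - j) ((pvRefl w k).toList.length : Int)) ' ') from rfl,
    length_pvRefl]
  unfold pvRefl
  refine congrArg String.ofList (List.map_congr_left ?_)
  intro i hi
  rw [PySem.List.mem_pyRange_one] at hi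
  rw [String.toList_ofList]
  simp only [PySem.Int.mod_eq_emod_of_pos hp]
  rw [PySem.List.pyGetD_map_pyRange_of_nonneg _ _ _ _ (Int.emod_nonneg _ (by omega))
    (Int.emod_lt_of_pos _ hp)]
  rw [sub_emod_right_emod]
  congr 2
  ring

lemma refl_refl (w : String) (hp : 0 < (w.toList.length : Int)) (k j : Int) :
    pvRefl (pvRefl w k) j = pvRot w (j - k) := by
  rw [show pvRefl (pvRefl w k) j = String.ofList
      ((PySem.List.pyRange 0 ((pvRefl w k).toList.length : Int)).map fun i =>
        PySem.List.pyGetD (pvRefl w k).toList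
          (PySem.Int.mod (j - i) ((pvRefl w k).toList.length : Int)) ' ') from rfl,
    length_pvRefl]
  unfold pvRot pvRefl
  refine congrArg String.ofList (List.map_congr_left ?_)
  intro i hi
  rw [PySem.List.mem_pyRange_one] at hi
  rw [String.toList_ofList]
  simp only [PySem.Int.mod_eq_emod_of_pos hp]
  rw [PySem.List.pyGetD_map_pyRange_of_nonneg _ _ _ _ (Int.emod_nonneg _ (by omega))
    (Int.emod_lt_of_pos _ hp)]
  rw [sub_emod_right_emod]
  congr 2
  ring

-- ---- the dihedral orbit is a group-action orbit: closure and symmetry ----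

lemma orbit_closed (w x : String) (hp : 0 < (w.toList.length : Int))
    (hx : x ∈ pvDihedralOrbit w) : ∀ y ∈ pvDihedralOrbit x, y ∈ pvDihedralOrbit w := by
  rw [mem_orbit_iff] at hx
  obtain ⟨k, _, hx⟩ := hx
  intro y hy
  rw [mem_orbit_iff] at hy
  obtain ⟨j, _, hy⟩ := hy
  rcases hx with rfl | rfl <;> rcases hy with rfl | rfl
  · rw [rot_rot w hp]; exact rot_mem_orbit w hp _
  · rw [refl_rot w hp]; exact refl_mem_orbit w hp _
  · rw [rot_refl w hp]; exact refl_mem_orbit w hp _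
  · rw [refl_refl w hp]; exact rot_mem_orbit w hp _

lemma orbit_sym (w x : String) (hp : 0 < (w.toList.length : Int))
    (hx : x ∈ pvDihedralOrbit w) : w ∈ pvDihedralOrbit x := by
  rw [mem_orbit_iff] at hx
  obtain ⟨k, _, hx⟩ := hx
  rcases hx with rfl | rfl
  · have hpx : 0 < ((pvRot w k).toList.length : Int) := by rw [length_pvRot]; exact hp
    have h : pvRot (pvRot w k) (-k) = w := by
      rw [rot_rot w hp, show k + -k = (0:Int) by ring, pvRot_zero]
    have hm := rot_mem_orbit (pvRot w k) hpx (-k)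
    rwa [h] at hm
  · have hpx : 0 < ((pvRefl w k).toList.length : Int) := by rw [length_pvRefl]; exact hp
    have h : pvRefl (pvRefl w k) k = w := by
      rw [refl_refl w hp, show k - k = (0:Int) by ring, pvRot_zero]
    have hm := refl_mem_orbit (pvRefl w k) hpx k
    rwa [h] at hm

-- ---- the canonical form classifies the orbits ----

lemma min?_congr_mem {s t : List String} (h : ∀ x, x ∈ s ↔ x ∈ t) :
    PySem.List.min? s (fun x => x) = PySem.List.min? t (fun x => x) := by
  cases hs : PySem.List.min? s (fun x => x) with
  | none =>
    rw [PySem.List.min?_eq_none_iff] at hs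
    subst hs
    cases ht : PySem.List.min? t (fun x => x) with
    | none => rfl
    | some m => exact absurd ((h m).mpr (PySem.List.min?_mem ht)) (List.not_mem_nil)
  | some m =>
    cases ht : PySem.List.min? t (fun x => x) with
    | none =>
      rw [PySem.List.min?_eq_none_iff] at ht
      subst ht
      exact absurd ((h m).mp (PySem.List.min?_mem hs)) (List.not_mem_nil)
    | some m' =>
      have h1 : m' ≤ m := PySem.List.min?_isMin ht m ((h m).mp (PySem.List.min?_mem hs))
      have h2 : m ≤ m' := PySem.List.min?_isMin hs m' ((h m').mpr (PySem.List.min?_mem ht))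
      rw [le_antisymm h1 h2]

lemma canon_some (w : String) (hw : w ≠ "") : ∃ c, pvCanon w = some c := by
  cases h : pvCanon w with
  | some c => exact ⟨c, rfl⟩
  | none =>
    unfold pvCanon at h
    rw [PySem.List.min?_eq_none_iff] at h
    exact absurd (mem_orbit_self w hw) (by rw [h]; exact List.not_mem_nil)

lemma canon_ne_empty (u : String) {c : String} (h : pvCanon u = some c) : u ≠ "" := by
  intro hu
  subst hu
  have : pvDihedralOrbit "" = [] := rfl
  unfold pvCanon at h
  rw [this] at h
  simp [PySem.List.min?] at h

lemma orbit_eq_of_mem (w x : String) (hp : 0 < (w.toList.length : Int))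
    (hx : x ∈ pvDihedralOrbit w) : ∀ y, y ∈ pvDihedralOrbit x ↔ y ∈ pvDihedralOrbit w := by
  intro y
  have hpx : 0 < (x.toList.length : Int) := by
    rw [mem_orbit_iff] at hx
    obtain ⟨k, _, hx⟩ := hx
    rcases hx with rfl | rfl
    · rw [length_pvRot]; exact hp
    · rw [length_pvRefl]; exact hp
  exact ⟨fun h => orbit_closed w x hp hx y h,
    fun h => orbit_closed x w hpx (orbit_sym w x hp hx) y h⟩

-- KEY: for a nonempty word w, membership in its orbit is equality of canonical forms
lemma mem_orbit_iff_canon (w u : String) (hw : w ≠ "") :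
    u ∈ pvDihedralOrbit w ↔ pvCanon u = pvCanon w := by
  have hp := len_pos_of_ne w hw
  constructor
  · intro hu
    exact min?_congr_mem (orbit_eq_of_mem w u hp hu)
  · intro h
    obtain ⟨c, hcw⟩ := canon_some w hw
    have hcu : pvCanon u = some c := by rw [h, hcw]
    have hu : u ≠ "" := canon_ne_empty u hcu
    have hpu := len_pos_of_ne u hu
    have hc_u : c ∈ pvDihedralOrbit u := PySem.List.min?_mem hcu
    have hc_w : c ∈ pvDihedralOrbit w := PySem.List.min?_mem hcw
    exact orbit_closed w c hp hc_w u (orbit_sym u c hpu hc_u)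

-- ---- A's loop equals the scan over the sorted distinct words ----

lemma min?_eq_of_min {R : List String} {w : String}
    (hmem : w ∈ R) (hmin : ∀ y ∈ R, w ≤ y) :
    PySem.List.min? R (fun x => x) = some w := by
  cases h : PySem.List.min? R (fun x => x) with
  | none =>
    rw [PySem.List.min?_eq_none_iff] at h
    subst h; cases hmem
  | some m =>
    have h1 : m ∈ R := PySem.List.min?_mem h
    have h2 := PySem.List.min?_isMin h w hmem
    have := le_antisymm h2 (hmin m h1)
    rw [this]

lemma length_filter_lt {l : List String} {p : String → Bool} {x : String}
    (hx : x ∈ l) (hp : ¬ p x) : (l.filter p).length < l.length := by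
  rcases List.mem_iff_append.mp hx with ⟨s, t, rfl⟩
  simp [List.filter_append, hp]
  have h1 := List.length_filter_le p s
  have h2 := List.length_filter_le p t
  omega

lemma contains_union (s t : PySem.Set String) (x : String) :
    (PySem.Set.union s t).contains x = (s.contains x || t.contains x) := by
  rw [Bool.eq_iff_iff]
  simp [PySem.Set.mem_union]

-- the loop invariant: A's min-extraction loop on any R agreeing (as a set) with the not-yet-seen
-- part of the strictly increasing list l computes the same result as the scan of l.
lemma loop_eq_scan :
    ∀ (l : List String), l.Pairwise (· < ·) → (∀ w ∈ l, w ≠ "") →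
    ∀ (seen R : List String) (fuel : Nat) (orbits : List (List String)) (reps : List String),
      R.Perm (l.filter (fun x => !seen.contains x)) →
      R.length ≤ fuel →
      pvLoopA fuel R orbits reps = pvScan l seen orbits reps := by
  intro l
  induction l with
  | nil =>
    intro _ _ seen R fuel orbits reps hperm _
    have hR : R = [] := List.Perm.eq_nil (by simpa using hperm)
    subst hR
    cases fuel <;> simp [pvLoopA, pvScan, PySem.List.min?]
  | cons w t ih =>
    intro hpair hne seen R fuel orbits reps hperm hfuel
    have hpt := (List.pairwise_cons.mp hpair).2
    have hwlt := (List.pairwise_cons.mp hpair).1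
    have hnet : ∀ y ∈ t, y ≠ "" := fun y hy => hne y (List.mem_cons_of_mem _ hy)
    by_cases hw : List.contains seen w = true
    · -- w already seen: the scan skips it; the filtered lists coincide
      rw [List.filter_cons_of_neg (by simp; simpa using hw)] at hperm
      rw [pvScan, if_pos hw]
      exact ih hpt hnet seen R fuel orbits reps hperm hfuel
    · -- w unseen: it is the minimum of R
      rw [List.filter_cons_of_pos
        (by simp; simpa using hw)] at hperm
      have hwR : w ∈ R := hperm.mem_iff.mpr (List.mem_cons_self ..)
      have hmin : ∀ y ∈ R, w ≤ y := by
        intro y hy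
        rcases List.mem_cons.mp (hperm.mem_iff.mp hy) with h | h
        · exact le_of_eq h.symm
        · exact le_of_lt (hwlt y (List.mem_of_mem_filter h))
      obtain ⟨fuel', rfl⟩ : ∃ f, fuel = f + 1 := by
        have : 0 < R.length := List.length_pos_iff.mpr (fun h => by subst h; cases hwR)
        exact ⟨fuel - 1, by omega⟩
      rw [pvScan, if_neg hw, pvLoopA, min?_eq_of_min hwR hmin]
      have hworb : w ∈ pvDihedralOrbit w := mem_orbit_self w (hne w (List.mem_cons_self ..))
      have hcw : (pvDihedralOrbit w).contains w = true := List.contains_iff_mem.mpr hworb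
      -- the new remaining set is (as a set) the not-yet-seen part of t for seen ∪ orb
      have hperm' : (PySem.Set.diff R (pvDihedralOrbit w)).Perm
          (t.filter (fun x => !(PySem.Set.union seen (pvDihedralOrbit w)).contains x)) := by
        have h1 : (PySem.Set.diff R (pvDihedralOrbit w)).Perm
            ((w :: t.filter (fun x => !seen.contains x)).filter
              (fun x => !(pvDihedralOrbit w).contains x)) :=
          hperm.filter _
        rw [List.filter_cons_of_neg (by simp; exact hworb), List.filter_filter] at h1
        refine h1.trans (List.Perm.of_eq (List.filter_congr ?_))
        intro x _
        rw [contains_union, Bool.not_or]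
        simp only [PySem.Set.contains]
        exact Bool.and_comm _ _
      have hlen : (PySem.Set.diff R (pvDihedralOrbit w)).length ≤ fuel' := by
        have h2 : (List.filter (fun x => !(pvDihedralOrbit w).contains x) R).length < R.length :=
          length_filter_lt hwR (by rw [hcw]; exact fun h => by cases h)
        have hd : PySem.Set.diff R (pvDihedralOrbit w)
            = List.filter (fun x => !(pvDihedralOrbit w).contains x) R := rfl
        rw [hd]; omega
      exact ih hpt hnet _ _ fuel' _ _ hperm' hlen

-- ---- the scan equals the kept-representatives form ----

lemma scan_eq_kept :
    ∀ (l : List String), (∀ w ∈ l, w ≠ "") →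
    ∀ (seen : PySem.Set String) (ks : List String) (orbits : List (List String)) (reps : List String),
      (∀ u : String, u ∈ seen ↔ ∃ c, pvCanon u = some c ∧ c ∈ ks) →
      pvScan l seen orbits reps =
        (orbits ++ (pvKept l ks).map pvDihedralOrbit, reps ++ pvKept l ks) := by
  intro l
  induction l with
  | nil => intro _ seen ks orbits reps _; simp [pvScan, pvKept]
  | cons w t ih =>
    intro hne seen ks orbits reps hinv
    have hw : w ≠ "" := hne w (List.mem_cons_self ..)
    have hnet : ∀ y ∈ t, y ≠ "" := fun y hy => hne y (List.mem_cons_of_mem _ hy)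
    obtain ⟨c, hc⟩ := canon_some w hw
    have hcontains : List.contains seen w = true ↔ c ∈ ks := by
      rw [List.contains_iff_mem, hinv w]
      constructor
      · rintro ⟨c', hc', h⟩; rw [hc] at hc'; cases hc'; exact h
      · intro h; exact ⟨c, hc, h⟩
    by_cases hcks : c ∈ ks
    · rw [pvScan, if_pos (hcontains.mpr hcks), pvKept_cons_some w t ks hc, if_pos hcks]
      exact ih hnet seen ks orbits reps hinv
    · rw [pvScan, if_neg (fun h => hcks (hcontains.mp h)), pvKept_cons_some w t ks hc,
        if_neg hcks]
      have hinv' : ∀ u : String,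
          u ∈ PySem.Set.union seen (pvDihedralOrbit w) ↔
            ∃ c', pvCanon u = some c' ∧ c' ∈ c :: ks := by
        intro u
        rw [PySem.Set.mem_union, hinv u]
        have horb : u ∈ pvDihedralOrbit w ↔ pvCanon u = some c := by
          rw [mem_orbit_iff_canon w u hw, hc]
        constructor
        · rintro (⟨c', hc', h⟩ | h)
          · exact ⟨c', hc', List.mem_cons_of_mem _ h⟩
          · exact ⟨c, horb.mp h, List.mem_cons_self ..⟩
        · rintro ⟨c', hc', h⟩
          rcases List.mem_cons.mp h with rfl | h
          · exact Or.inr (horb.mpr hc')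
          · exact Or.inl ⟨c', hc', h⟩
      rw [ih hnet _ _ _ _ hinv']
      simp [List.append_assoc]

-- ---- B's bucket fold produces exactly the kept representatives ----

lemma pvKept_congr : ∀ (l : List String) (ks ks' : List String),
    (∀ c, c ∈ ks ↔ c ∈ ks') → pvKept l ks = pvKept l ks' := by
  intro l
  induction l with
  | nil => intro _ _ _; rfl
  | cons w t ih =>
    intro ks ks' h
    cases hc : pvCanon w with
    | none => rw [pvKept, pvKept, hc]; exact ih ks ks' h
    | some c =>
      rw [pvKept_cons_some w t ks hc, pvKept_cons_some w t ks' hc]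
      by_cases hcks : c ∈ ks
      · rw [if_pos hcks, if_pos ((h c).mp hcks)]
        exact ih ks ks' h
      · rw [if_neg hcks, if_neg (fun hk => hcks ((h c).mpr hk))]
        refine congrArg (w :: ·) (ih _ _ ?_)
        intro c'
        simp only [List.mem_cons]
        exact or_congr Iff.rfl (h c')

lemma buckets_values : ∀ (l : List String), (∀ w ∈ l, w ≠ "") →
    ∀ d : PySem.Dict String String,
      (l.foldl pvBucketStep d).values = d.values ++ pvKept l d.keys := by
  intro l
  induction l with
  | nil => intro _ d; simp [pvKept]
  | cons w t ih =>
    intro hne d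
    have hw : w ≠ "" := hne w (List.mem_cons_self ..)
    have hnet : ∀ y ∈ t, y ≠ "" := fun y hy => hne y (List.mem_cons_of_mem _ hy)
    obtain ⟨c, hc⟩ := canon_some w hw
    rw [List.foldl_cons, pvKept_cons_some w t d.keys hc]
    have hstep : pvBucketStep d w =
        if d.contains c then d else d.insert c w := by
      unfold pvBucketStep
      unfold pvCanon at hc
      rw [hc]
    by_cases hdc : d.contains c = true
    · rw [hstep, if_pos hdc, if_pos ((PySem.Dict.contains_iff_mem_keys d c).mp hdc)]
      exact ih hnet d
    · have hdc' : d.contains c = false := by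
        cases h : d.contains c
        · rfl
        · exact absurd h hdc
      rw [hstep, if_neg hdc,
        if_neg (fun h => hdc ((PySem.Dict.contains_iff_mem_keys d c).mpr h))]
      rw [ih hnet (d.insert c w)]
      have hkeys : (d.insert c w).keys = d.keys ++ [c] :=
        PySem.Dict.keys_insert_of_not_contains d w hdc'
      have hvals : (d.insert c w).values = d.values ++ [w] := by
        simp only [PySem.Dict.values, PySem.Dict.items_insert_of_not_contains d w hdc',
          List.map_append, List.map_cons, List.map_nil]
      rw [hkeys, hvals, pvKept_congr t (d.keys ++ [c]) (c :: d.keys)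
        (by intro c'; simp [List.mem_append, List.mem_cons]; tauto)]
      simp [List.append_assoc]

-- ===== VERDICT (by name: the statement is the Claim_ definition above) =====
theorem orbit_representatives_spec : Claim_equal_orbit_representatives := by
  intro words _ hpre
  unfold Spec_orbit_representatives orbit_representatives orbit_representatives_alt
  have hS_ne : ∀ w ∈ PySem.List.sorted (PySem.Set.ofList words) (fun x => x), w ≠ "" := by
    intro w hw
    rw [PySem.List.mem_sorted, PySem.Set.mem_ofList] at hw
    exact fun h => hpre (h ▸ hw)
  have hA := loop_eq_scan _ (PySem.List.sorted_ofList_pairwise_lt (κ := String) words) hS_ne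
    [] (PySem.Set.ofList words) (PySem.Set.ofList words).length [] []
    (by simpa using (PySem.List.sorted_perm (PySem.Set.ofList words) (fun x => x) false).symm)
    le_rfl
  have hScan := scan_eq_kept _ hS_ne [] [] [] [] (by simp)
  have hB := buckets_values _ hS_ne PySem.Dict.empty
  have hk : (PySem.Dict.empty : PySem.Dict String String).keys = [] := rfl
  have hv : (PySem.Dict.empty : PySem.Dict String String).values = [] := rfl
  rw [hk, hv, List.nil_append] at hB
  simp only [hA, hScan, List.nil_append]
  rw [hB]
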